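-- pv_equiv track=rewrite | github.com/CP-Srinivasa/KAI | app/analysis/narratives/cluster.py | _dominant_from_weighted
-- ===== SOURCE A (Python) =====
-- from collections import Counter
--
-- _VALID_DIRECTIONS = frozenset({"bullish", "bearish", "neutral", "mixed"})
--
-- def _dominant_from_weighted(
--     directions: list[str],
--     weights: list[int],
-- ) -> str:
--     """Weighted dominant direction — used when merging existing clusters."""
--     counter: Counter[str] = Counter()
--     for d, w in zip(directions, weights, strict=True):
--         counter[d] += w
--     if not counter:
--         return "neutral"
--     most_common = counter.most_common(2)
--     if len(most_common) == 2 and most_common[0][1] == most_common[1][1]: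
--         return "mixed"
--     direction = most_common[0][0]
--     return direction if direction in _VALID_DIRECTIONS else "neutral"
-- ===== SOURCE B (Python) =====
-- _VALID_DIRECTIONS = frozenset({"bullish", "bearish", "neutral", "mixed"})
--
-- def _dominant_from_weighted(
--     directions: list[str],
--     weights: list[int],
-- ) -> str:
--     """Weighted dominant direction via a single max/tie scan (no Counter, no sort)."""
--     sums: dict[str, int] = {}
--     for d, w in zip(directions, weights, strict=True):
--         sums[d] = sums.get(d, 0) + w
--     if not sums:
--         return "neutral"
--     it = iter(sums.items())
--     best_dir, best = next(it)
--     tie = False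
--     for d, v in it:
--         if v > best:
--             best_dir, best, tie = d, v, False
--         elif v == best:
--             tie = True
--     if tie:
--         return "mixed"
--     return best_dir if best_dir in _VALID_DIRECTIONS else "neutral"
-- ===== Notes on version B (the rewrite author's own statement) =====
-- stated objective: simpler
-- what changed: Replaces Counter plus a sort-based most_common(2) tie test by a plain dict accumulation and one linear max/tie scan over the items.
import Mathlib
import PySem

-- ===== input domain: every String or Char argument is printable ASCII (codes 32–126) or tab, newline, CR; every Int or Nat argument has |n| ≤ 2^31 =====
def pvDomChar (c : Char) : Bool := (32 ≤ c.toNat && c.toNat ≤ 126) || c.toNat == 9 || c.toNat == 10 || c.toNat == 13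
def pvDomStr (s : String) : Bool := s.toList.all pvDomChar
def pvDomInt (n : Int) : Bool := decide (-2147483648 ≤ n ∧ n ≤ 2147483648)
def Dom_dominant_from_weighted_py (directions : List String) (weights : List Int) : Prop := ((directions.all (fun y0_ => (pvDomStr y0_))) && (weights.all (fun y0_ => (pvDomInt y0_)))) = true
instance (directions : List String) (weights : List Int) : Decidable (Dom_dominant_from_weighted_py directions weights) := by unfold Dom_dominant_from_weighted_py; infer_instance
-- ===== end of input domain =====

-- B replaces Counter + sort-based most_common(2) by a dict accumulation and one linear
-- max/tie scan over the items (simpler, no sort); same return value on equal-length inputs.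

-- ===== PORT A =====
-- _VALID_DIRECTIONS = frozenset({"bullish", "bearish", "neutral", "mixed"})
def pyValidDirections : List String := ["bullish", "bearish", "neutral", "mixed"]

def dominant_from_weighted_py (directions : List String) (weights : List Int) : String :=
  -- counter[d] += w over zip(directions, weights)  (strict=True: Pre_ demands equal lengths)
  let counter : PySem.Dict String Int :=
    (directions.zip weights).foldl (fun c p => c.modify p.1 0 (· + p.2)) PySem.Dict.empty
  if counter.items = [] then "neutral"
  else
    -- counter.most_common(2) = first two items of the count-descending stable sort
    let most_common := (PySem.List.sorted counter.items (fun p => p.2) true).take 2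
    match most_common with
    | p0 :: p1 :: _ =>
        if p0.2 = p1.2 then "mixed"
        else if p0.1 ∈ pyValidDirections then p0.1 else "neutral"
    | p0 :: [] => if p0.1 ∈ pyValidDirections then p0.1 else "neutral"
    | [] => "neutral"   -- unreachable: counter nonempty

-- ===== PORT B =====
-- loop body of B's max/tie scan: state = (best_dir, best, tie)
def pyScanStep (st : String × Int × Bool) (p : String × Int) : String × Int × Bool :=
  if st.2.1 < p.2 then (p.1, p.2, false)
  else if p.2 = st.2.1 then (st.1, st.2.1, true)
  else st

def dominant_from_weighted_py_alt (directions : List String) (weights : List Int) : String :=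
  let sums : PySem.Dict String Int :=
    (directions.zip weights).foldl (fun s p => s.insert p.1 (s.getD p.1 0 + p.2)) PySem.Dict.empty
  match sums.items with
  | [] => "neutral"
  | (d0, v0) :: rest =>
    let r := rest.foldl pyScanStep (d0, v0, false)
    if r.2.2 then "mixed"
    else if r.1 ∈ ["bullish", "bearish", "neutral", "mixed"] then r.1 else "neutral"

-- ===== PRECONDITION & SPEC =====
-- zip(..., strict=True) raises ValueError when the lists have different lengths; Pre_ excludes exactly that.
def Pre_dominant_from_weighted_py (directions : List String) (weights : List Int) : Prop :=
  directions.length = weights.length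
instance (directions : List String) (weights : List Int) : Decidable (Pre_dominant_from_weighted_py directions weights) := by unfold Pre_dominant_from_weighted_py; infer_instance

def pvWitness_dominant_from_weighted_py : List String × List Int := (["bullish", "bearish"], [2, 1])

def Spec_dominant_from_weighted_py (directions : List String) (weights : List Int) (out : String) : Prop := out = dominant_from_weighted_py_alt directions weights
instance (directions : List String) (weights : List Int) (out : String) : Decidable (Spec_dominant_from_weighted_py directions weights out) := by unfold Spec_dominant_from_weighted_py; infer_instance

-- ===== CLAIM (what is proved, stated in full; the proofs are below) =====
def Claim_equal_dominant_from_weighted_py : Prop := ∀ (directions : List String) (weights : List Int), Dom_dominant_from_weighted_py directions weights → Pre_dominant_from_weighted_py directions weights → Spec_dominant_from_weighted_py directions weights (dominant_from_weighted_py directions weights)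

-- ===== LEMMAS AND PROOFS =====

-- the two accumulation loops build the same dict
lemma dicts_eq (l : List (String × Int)) (d : PySem.Dict String Int) :
    l.foldl (fun c p => c.modify p.1 0 (· + p.2)) d
      = l.foldl (fun s p => s.insert p.1 (s.getD p.1 0 + p.2)) d := by
  induction l generalizing d with
  | nil => rfl
  | cons p t ih =>
      simp only [List.foldl_cons]
      rw [show d.modify p.1 0 (· + p.2) = d.insert p.1 (d.getD p.1 0 + p.2) by
        simp [PySem.Dict.modify]]
      exact ih _

-- running maximum of the values, seeded with v0
def vmax (rest : List (String × Int)) (v0 : Int) : Int :=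
  rest.foldl (fun m p => max m p.2) v0

lemma le_vmax (rest : List (String × Int)) (v0 : Int) : v0 ≤ vmax rest v0 := by
  induction rest generalizing v0 with
  | nil => simp [vmax]
  | cons p t ih =>
      have := ih (max v0 p.2)
      simp only [vmax, List.foldl_cons] at *
      exact le_trans (le_max_left _ _) this

lemma mem_le_vmax (rest : List (String × Int)) (v0 : Int) :
    ∀ p ∈ rest, p.2 ≤ vmax rest v0 := by
  induction rest generalizing v0 with
  | nil => simp
  | cons q t ih =>
      intro p hp
      simp only [List.mem_cons] at hp
      simp only [vmax, List.foldl_cons]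
      rcases hp with rfl | hp
      · exact le_trans (le_max_right _ _) (le_vmax t _)
      · exact ih _ p hp

lemma vmax_attained (rest : List (String × Int)) (v0 : Int) :
    vmax rest v0 = v0 ∨ ∃ p ∈ rest, p.2 = vmax rest v0 := by
  induction rest generalizing v0 with
  | nil => simp [vmax]
  | cons q t ih =>
      simp only [vmax, List.foldl_cons] at *
      rcases ih (max v0 q.2) with h | ⟨p, hp, he⟩
      · by_cases hq : q.2 ≤ v0
        · left; rw [h]; omega
        · right; exact ⟨q, by simp, by rw [h]; omega⟩
      · right; exact ⟨p, by simp [hp], he⟩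

-- characterisation of B's scan
lemma scan_spec (rest : List (String × Int)) :
    ∀ (k0 : String) (v0 : Int) (t0 : Bool),
      (rest.foldl pyScanStep (k0, v0, t0)).2.1 = vmax rest v0 ∧
      ((rest.foldl pyScanStep (k0, v0, t0)).1, vmax rest v0) ∈ (k0, v0) :: rest ∧
      ((rest.foldl pyScanStep (k0, v0, t0)).2.2 = true ↔
        2 ≤ ((k0, v0) :: rest).countP (fun p => decide (p.2 = vmax rest v0)) ∨
          (t0 = true ∧ v0 = vmax rest v0)) := by
  induction rest with
  | nil =>
      intro k0 v0 t0
      refine ⟨rfl, by simp [vmax], ?_⟩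
      simp [vmax]
  | cons q t ih =>
      intro k0 v0 t0
      have hV : vmax (q :: t) v0 = vmax t (max v0 q.2) := by simp [vmax]
      by_cases h1 : v0 < q.2
      · -- new running maximum: seed becomes (q.1, q.2, false)
        have hstep : pyScanStep (k0, v0, t0) q = (q.1, q.2, false) := by
          simp [pyScanStep, h1]
        have hmx : max v0 q.2 = q.2 := by omega
        obtain ⟨ih1, ih2, ih3⟩ := ih q.1 q.2 false
        have hv0ne : ¬ (v0 = vmax t q.2) := by
          have := le_vmax t q.2; omega
        refine ⟨?_, ?_, ?_⟩
        · simp only [List.foldl_cons, hstep, hV, hmx]; exact ih1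
        · simp only [List.foldl_cons, hstep, hV, hmx]
          rcases List.mem_cons.mp ih2 with h | h
          · rw [h]; simp
          · exact List.mem_cons_of_mem _ (List.mem_cons_of_mem _ h)
        · simp only [List.foldl_cons, hstep, hV, hmx]
          rw [ih3]
          have hcnt : ((k0, v0) :: q :: t).countP (fun p => decide (p.2 = vmax t q.2)) =
              ((q.1, q.2) :: t).countP (fun p => decide (p.2 = vmax t q.2)) := by
            simp [List.countP_cons, hv0ne]
          rw [hcnt]
          simp [hv0ne]
      · have hmx : max v0 q.2 = v0 := by omega
        by_cases h2 : q.2 = v0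
        · -- equals the running maximum: tie flag set
          have hstep : pyScanStep (k0, v0, t0) q = (k0, v0, true) := by
            simp [pyScanStep, h2]
          obtain ⟨ih1, ih2, ih3⟩ := ih k0 v0 true
          refine ⟨?_, ?_, ?_⟩
          · simp only [List.foldl_cons, hstep, hV, hmx]; exact ih1
          · simp only [List.foldl_cons, hstep, hV, hmx]
            rcases List.mem_cons.mp ih2 with h | h
            · rw [h]; simp
            · exact List.mem_cons_of_mem _ (List.mem_cons_of_mem _ h)
          · simp only [List.foldl_cons, hstep, hV, hmx]
            by_cases hv : v0 = vmax t v0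
            · have hqv : (decide (q.2 = vmax t v0) : Bool) = true :=
                decide_eq_true (h2.trans hv)
              have hkv : (decide (v0 = vmax t v0) : Bool) = true := decide_eq_true hv
              have hc2 : 2 ≤ ((k0, v0) :: q :: t).countP (fun p => decide (p.2 = vmax t v0)) := by
                rw [List.countP_cons, List.countP_cons, hqv, hkv]
                simp
              have hlhs : (t.foldl pyScanStep (k0, v0, true)).2.2 = true :=
                ih3.mpr (Or.inr ⟨rfl, hv⟩)
              simp [hlhs, hc2]
            · have hqv : ¬ (q.2 = vmax t v0) := by rw [h2]; exact hv
              have hcnt : ((k0, v0) :: q :: t).countP (fun p => decide (p.2 = vmax t v0)) =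
                  ((k0, v0) :: t).countP (fun p => decide (p.2 = vmax t v0)) := by
                simp [List.countP_cons, hqv]
              rw [ih3, hcnt]
              simp [hv]
        · -- strictly below the running maximum: nothing changes
          have h3 : q.2 < v0 := by omega
          have hstep : pyScanStep (k0, v0, t0) q = (k0, v0, t0) := by
            simp [pyScanStep, h1, h2]
          obtain ⟨ih1, ih2, ih3⟩ := ih k0 v0 t0
          have hqne : ¬ (q.2 = vmax t v0) := by
            have := le_vmax t v0; omega
          refine ⟨?_, ?_, ?_⟩
          · simp only [List.foldl_cons, hstep, hV, hmx]; exact ih1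
          · simp only [List.foldl_cons, hstep, hV, hmx]
            rcases List.mem_cons.mp ih2 with h | h
            · rw [h]; simp
            · exact List.mem_cons_of_mem _ (List.mem_cons_of_mem _ h)
          · simp only [List.foldl_cons, hstep, hV, hmx]
            rw [ih3]
            have hcnt : ((k0, v0) :: q :: t).countP (fun p => decide (p.2 = vmax t v0)) =
                ((k0, v0) :: t).countP (fun p => decide (p.2 = vmax t v0)) := by
              simp [List.countP_cons, hqne]
            rw [hcnt]

-- the tails of the two ports agree on every items list
lemma tails_eq (k0 : String) (v0 : Int) (rest : List (String × Int)) :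
    (match (PySem.List.sorted ((k0, v0) :: rest) (fun p => p.2) true).take 2 with
     | p0 :: p1 :: _ =>
         if p0.2 = p1.2 then "mixed"
         else if p0.1 ∈ pyValidDirections then p0.1 else "neutral"
     | p0 :: [] => if p0.1 ∈ pyValidDirections then p0.1 else "neutral"
     | [] => "neutral")
    = (if (rest.foldl pyScanStep (k0, v0, false)).2.2 then "mixed"
       else if (rest.foldl pyScanStep (k0, v0, false)).1 ∈ ["bullish", "bearish", "neutral", "mixed"]
            then (rest.foldl pyScanStep (k0, v0, false)).1 else "neutral") := by
  set l := (k0, v0) :: rest with hl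
  set V := vmax rest v0 with hVdef
  set s := PySem.List.sorted l (fun p => p.2) true with hs
  have hsort : PySem.List.sorted l (fun p => p.2) true = s := hs.symm
  have hperm : s.Perm l := hsort ▸ PySem.List.sorted_perm _ _ _
  have hsne : s ≠ [] := by
    intro h
    rw [← hsort, PySem.List.sorted_eq_nil_iff] at h
    simp [hl] at h
  obtain ⟨h, t, hst⟩ := List.exists_cons_of_ne_nil hsne
  -- head of the descending sort has the maximal value V
  have hhl : h ∈ l := hperm.mem_iff.mp (by simp [hst])
  have hge : ∀ y ∈ l, y.2 ≤ h.2 :=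
    PySem.List.key_head_sorted_rev_ge l (fun p => p.2) (by rw [hsort, hst])
  have hhV : h.2 = V := by
    have h1 : h.2 ≤ V := by
      rcases List.mem_cons.mp (hl ▸ hhl) with heq | hm
      · rw [heq]; exact le_vmax rest v0
      · exact mem_le_vmax rest v0 h hm
    have h2 : V ≤ h.2 := by
      rcases vmax_attained rest v0 with hv | ⟨p, hp, he⟩
      · rw [hVdef, hv]; exact hge (k0, v0) (by simp [hl])
      · rw [hVdef, ← he]; exact hge p (by simp [hl, hp])
    omega
  obtain ⟨hr1, hr2, hr3⟩ := scan_spec rest k0 v0 false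
  have hcntP : s.countP (fun p => decide (p.2 = V)) = l.countP (fun p => decide (p.2 = V)) :=
    hperm.countP_eq _
  by_cases hc : 2 ≤ l.countP (fun p => decide (p.2 = V))
  -- tie: both sides return "mixed"
  · have htie : (rest.foldl pyScanStep (k0, v0, false)).2.2 = true := hr3.mpr (Or.inl (hl ▸ hc))
    have hsplit : s.countP (fun p => decide (p.2 = V)) =
        t.countP (fun p => decide (p.2 = V)) + 1 := by
      rw [hst]; simp [hhV]
    have hts : 0 < t.countP (fun p => decide (p.2 = V)) := by omega
    obtain ⟨q, hq, hqV⟩ := List.countP_pos_iff.mp hts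
    simp only [decide_eq_true_eq] at hqV
    obtain ⟨h2, t2, ht2⟩ := List.exists_cons_of_ne_nil (show t ≠ [] by rintro rfl; simp at hq)
    have hpw : s.Pairwise (fun a b => b.2 ≤ a.2) :=
      hsort ▸ PySem.List.sorted_pairwise_rev _ _
    have hh2V : h2.2 = V := by
      have hh2l : h2 ∈ l := hperm.mem_iff.mp (by simp [hst, ht2])
      have hle : h2.2 ≤ V := by
        rcases List.mem_cons.mp (hl ▸ hh2l) with heq | hm
        · rw [heq]; exact le_vmax rest v0
        · exact mem_le_vmax rest v0 h2 hm
      have hge2 : V ≤ h2.2 := by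
        rw [hst, ht2] at hpw
        have hp1 := (List.pairwise_cons.mp hpw).2
        have hge3 := (List.pairwise_cons.mp hp1).1
        rw [ht2] at hq
        rcases List.mem_cons.mp hq with heq | hm
        · rw [← heq, hqV]
        · have := hge3 q hm; omega
      omega
    rw [hst, ht2]
    simp only [List.take_succ_cons, List.take_zero]
    rw [if_pos (by rw [hhV, hh2V]), htie]
    simp
  -- unique maximum: both return the (validated) key of the unique argmax
  · have htie : (rest.foldl pyScanStep (k0, v0, false)).2.2 = false := by
      rcases Bool.eq_false_or_eq_true ((rest.foldl pyScanStep (k0, v0, false)).2.2) with hb | hb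
      · rcases hr3.mp hb with hcc | ⟨hf, _⟩
        · exact absurd (hl ▸ hcc) hc
        · exact absurd hf (by simp)
      · exact hb
    have hc1 : l.countP (fun p => decide (p.2 = V)) = 1 := by
      have : 0 < l.countP (fun p => decide (p.2 = V)) :=
        List.countP_pos_iff.mpr ⟨h, hhl, by simp [hhV]⟩
      omega
    -- the filter has exactly one element; both candidate pairs are in it
    have hflen : (l.filter (fun p => decide (p.2 = V))).length = 1 := by
      rw [← hc1, List.countP_eq_length_filter]
    obtain ⟨a, ha⟩ := List.length_eq_one_iff.mp hflen
    have hhf : h ∈ l.filter (fun p => decide (p.2 = V)) :=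
      List.mem_filter.mpr ⟨hhl, by simp [hhV]⟩
    have hrf : ((rest.foldl pyScanStep (k0, v0, false)).1, V) ∈
        l.filter (fun p => decide (p.2 = V)) :=
      List.mem_filter.mpr ⟨hl ▸ hr2, by simp⟩
    rw [ha] at hhf hrf
    simp only [List.mem_singleton] at hhf hrf
    have hkey : h.1 = (rest.foldl pyScanStep (k0, v0, false)).1 :=
      congrArg Prod.fst (hhf.trans hrf.symm)
    rw [hst, htie]
    cases t with
    | nil =>
        simp only [List.take_succ_cons, List.take_nil]
        rw [hkey]
        simp only [pyValidDirections]
        simp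
    | cons h2 t2 =>
        have hh2ne : ¬ (h.2 = h2.2) := by
          intro heq
          have hh2V : h2.2 = V := by rw [← heq]; exact hhV
          have h2s : 2 ≤ s.countP (fun p => decide (p.2 = V)) := by
            rw [hst]
            simp only [List.countP_cons, decide_eq_true_eq, hhV, hh2V]
            simp
          omega
        simp only [List.take_succ_cons, List.take_zero]
        rw [if_neg hh2ne, hkey]
        simp only [pyValidDirections]
        simp

-- the whole bodies agree on every items list
lemma bodies_eq (l : List (String × Int)) :
    (if l = [] then "neutral"
     else
       match (PySem.List.sorted l (fun p => p.2) true).take 2 with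
       | p0 :: p1 :: _ =>
           if p0.2 = p1.2 then "mixed"
           else if p0.1 ∈ pyValidDirections then p0.1 else "neutral"
       | p0 :: [] => if p0.1 ∈ pyValidDirections then p0.1 else "neutral"
       | [] => "neutral")
    = (match l with
       | [] => "neutral"
       | (d0, v0) :: rest =>
           if (rest.foldl pyScanStep (d0, v0, false)).2.2 then "mixed"
           else if (rest.foldl pyScanStep (d0, v0, false)).1 ∈ ["bullish", "bearish", "neutral", "mixed"]
                then (rest.foldl pyScanStep (d0, v0, false)).1 else "neutral") := by
  cases l with
  | nil => simp
  | cons p rest =>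
      obtain ⟨k0, v0⟩ := p
      rw [if_neg (by simp)]
      exact tails_eq k0 v0 rest

-- ===== VERDICT (by name: the statement is the Claim_ definition above) =====
theorem dominant_from_weighted_py_spec : Claim_equal_dominant_from_weighted_py := by
  intro directions weights _ _
  unfold Spec_dominant_from_weighted_py dominant_from_weighted_py dominant_from_weighted_py_alt
  rw [dicts_eq]
  exact bodies_eq _
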